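-- pv_equiv track=rewrite | github.com/keongmini/Algorithm_Study | codility/Caterpillar_method4.py | solution
-- ===== SOURCE A (Python) =====
-- def solution(A):
--     A.sort()
--
--     if A[0] >= 0:
--         return A[0] + A[1]
--
--     if A[-1] <= 0:
--         return abs(A[-1] + A[-2])
--
--     left = 0
--     right = len(A) - 1
--     result = int(1e9) * 2
--     while A[left] < 0:
--         while A[right] >= 0:
--             if abs(A[left] + A[right]) < result:
--                 result = abs(A[left] + A[right])
--             right -= 1
--         left += 1
--         right = len(A) - 1
--
--     return result
-- ===== SOURCE B (Python) =====
-- # Sort once, then a single two-pointer sweep over the negative block and the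
-- # nonnegative block (O(n log n) instead of A's O(n^2) nested scan).
-- # Note: A sorts its argument in place; B does not mutate (return values agree).
-- def solution(A):
--     s = sorted(A)
--     if s[0] >= 0:
--         return s[0] + s[1]
--     if s[-1] <= 0:
--         return -(s[-1] + s[-2])
--     negs = [x for x in s if x < 0]
--     pos = [x for x in s if x >= 0]
--     i = 0
--     j = len(pos) - 1
--     best = abs(negs[0] + pos[j])
--     while True:
--         v = negs[i] + pos[j]
--         if abs(v) < best:
--             best = abs(v)
--         if v > 0:
--             if j == 0:
--                 break
--             j -= 1
--         else:
--             if i == len(negs) - 1: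
--                 break
--             i += 1
--     return best
-- ===== Notes on version B (the rewrite author's own statement) =====
-- stated objective: faster
-- what changed: A re-scans the whole nonnegative suffix for every negative element (nested while loops); B sorts once, splits into the negative and nonnegative blocks and finds the minimal |x+y| with a single two-pointer sweep.
-- intended difference: On mixed-sign inputs (some element < 0 and some > 0) where every negative/nonnegative pair satisfies |x+y| > 2000000000, A's strict-< update never fires and it returns its initial sentinel 2000000000, while B returns the true minimal |x+y| (e.g. 2147483647 on [-2147483648, 1]), which is what the function is meant to compute. — e.g. on solution([-2147483648, 1]): A returns 2000000000, B returns 2147483647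
import Mathlib
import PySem

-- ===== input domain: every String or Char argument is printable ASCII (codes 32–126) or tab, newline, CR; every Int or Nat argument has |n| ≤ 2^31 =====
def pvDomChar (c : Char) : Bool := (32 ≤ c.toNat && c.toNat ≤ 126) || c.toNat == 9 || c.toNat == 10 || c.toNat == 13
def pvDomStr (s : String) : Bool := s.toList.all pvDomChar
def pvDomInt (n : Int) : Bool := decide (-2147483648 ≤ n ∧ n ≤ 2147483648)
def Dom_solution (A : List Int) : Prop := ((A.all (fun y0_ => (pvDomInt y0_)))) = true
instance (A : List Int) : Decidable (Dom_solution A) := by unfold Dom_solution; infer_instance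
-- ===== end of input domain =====

-- B replaces A's nested rescans of the nonnegative suffix by a single two-pointer
-- sweep; return-value equivalence only: A sorts its argument in place, B does not
-- mutate it.

-- ===== PORT A =====
-- inner `while A[right] >= 0: ...; right -= 1` loop, structural recursion on `right`.
-- The loop only runs when s[0] < 0 (the `A[0] >= 0` branch returned otherwise), so
-- Python's `right` stops on a negative element at index ≥ 0 and never wraps around;
-- the `r = 0` equation below is exact on every reachable state.
def aInner (s : List Int) (x res : Int) : Nat → Int
  | 0 =>
    if 0 ≤ s.getD 0 0 then
      (if |x + s.getD 0 0| < res then |x + s.getD 0 0| else res)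
    else res
  | (r+1) =>
    if 0 ≤ s.getD (r+1) 0 then
      aInner s x (if |x + s.getD (r+1) 0| < res then |x + s.getD (r+1) 0| else res) r
    else res

-- outer `while A[left] < 0` loop; the fuel `s.length` bounds its iteration count
-- (the loop stops at the first nonnegative element, which exists whenever it runs).
def aOuter (s : List Int) (left : Nat) (res : Int) : Nat → Int
  | 0 => res
  | (f+1) =>
    if s.getD left 0 < 0 then
      aOuter s (left+1) (aInner s (s.getD left 0) res (s.length - 1)) f
    else res

-- `A.sort()` mutates A in place; only the return value is modelled.
-- Indices 0, 1, -1, -2 are in range under Pre_solution (len ≥ 2), so `getD` is exact.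
def solution (A : List Int) : Int :=
  let s := PySem.List.sorted A (fun x => x) false
  if 0 ≤ s.getD 0 0 then s.getD 0 0 + s.getD 1 0
  else if s.getD (s.length - 1) 0 ≤ 0 then |s.getD (s.length - 1) 0 + s.getD (s.length - 2) 0|
  else aOuter s 0 2000000000 s.length

-- ===== PORT B =====
-- two-pointer sweep of Source B (`while True` with breaks); the fuel
-- `negs.length + pos.length` bounds the number of steps (each step moves one of the
-- two pointers), and Python's break test `i == len(negs) - 1` is written
-- `len(negs) - 1 ≤ i` — equal in every reachable state, since i never exceeds
-- len(negs) - 1.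
def bLoop (negs pos : List Int) : Nat → Nat → Int → Nat → Int
  | _, _, best, 0 => best
  | i, j, best, (f+1) =>
    let v := negs.getD i 0 + pos.getD j 0
    let best' := if |v| < best then |v| else best
    if 0 < v then
      if j = 0 then best'
      else bLoop negs pos i (j-1) best' f
    else
      if negs.length - 1 ≤ i then best'
      else bLoop negs pos (i+1) j best' f

def solution_alt (A : List Int) : Int :=
  let s := PySem.List.sorted A (fun x => x) false
  if 0 ≤ s.getD 0 0 then s.getD 0 0 + s.getD 1 0
  else if s.getD (s.length - 1) 0 ≤ 0 then -(s.getD (s.length - 1) 0 + s.getD (s.length - 2) 0)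
  else
    let negs := s.filter (fun x => decide (x < 0))
    let pos := s.filter (fun x => decide (0 ≤ x))
    bLoop negs pos 0 (pos.length - 1) (abs (negs.getD 0 0 + pos.getD (pos.length - 1) 0))
      (negs.length + pos.length)

-- ===== PRECONDITION & SPEC =====
-- Python A raises IndexError on lists of fewer than 2 elements; nothing else is excluded.
def Pre_solution (A : List Int) : Prop := 2 ≤ A.length
instance (A : List Int) : Decidable (Pre_solution A) := by unfold Pre_solution; infer_instance
def pvWitness_solution : List Int := [-2, 1]

-- On mixed-sign inputs (some element < 0, some > 0) where every negative/nonnegative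
-- pair has |x+y| > 2000000000, A's strict-< update never fires and A returns its
-- sentinel 2000000000, while B returns the true minimal |x+y|, the intended value.
def D_solution (A : List Int) : Prop :=
  (∃ x ∈ A, x < 0) ∧ (∃ y ∈ A, 0 < y) ∧
    ∀ x ∈ A, x < 0 → ∀ y ∈ A, 0 ≤ y → 2000000000 < |x + y|
instance (A : List Int) : Decidable (D_solution A) := by unfold D_solution; infer_instance

def Spec_solution (A : List Int) (out : Int) : Prop := ¬ D_solution A → out = solution_alt A
instance (A : List Int) (out : Int) : Decidable (Spec_solution A out) := by unfold Spec_solution; infer_instance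

def pvDiffWitness_solution : List Int := [-2147483648, 1]
def pvDiffWitnessOut_solution : Int × Int := (2000000000, 2147483647)

-- ===== CLAIM (what is proved, stated in full; the proofs are below) =====
def Claim_unchanged_solution : Prop :=
  ∀ (A : List Int), Dom_solution A → Pre_solution A → Spec_solution A (solution A)
def Claim_changed_solution : Prop :=
  Dom_solution (pvDiffWitness_solution) ∧ Pre_solution (pvDiffWitness_solution) ∧
  D_solution (pvDiffWitness_solution) ∧
  solution (pvDiffWitness_solution) = pvDiffWitnessOut_solution.1 ∧
  solution_alt (pvDiffWitness_solution) = pvDiffWitnessOut_solution.2 ∧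
  pvDiffWitnessOut_solution.1 ≠ pvDiffWitnessOut_solution.2
def Claim_exact_solution : Prop :=
  ∀ (A : List Int), Dom_solution A → Pre_solution A → D_solution A →
    solution A ≠ solution_alt A

-- ===== LEMMAS AND PROOFS =====

-- ---- a small kit about foldl min over Int lists ----
theorem pvIfMin (a b : Int) : (if b < a then b else a) = min a b := by
  split_ifs <;> omega

theorem pvFoldlMin_le_init (l : List Int) : ∀ b : Int, l.foldl min b ≤ b := by
  induction l with
  | nil => intro b; simp
  | cons a t ih => intro b; exact le_trans (ih (min b a)) (by omega)

theorem pvFoldlMin_init_comm (l : List Int) :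
    ∀ b c : Int, l.foldl min (min b c) = min c (l.foldl min b) := by
  induction l with
  | nil => intro b c; simp [min_comm]
  | cons a t ih =>
      intro b c
      have h : min (min b c) a = min (min b a) c := by omega
      simp only [List.foldl_cons, h, ih (min b a) c]

theorem pvFoldlMin_present {c : Int} {l : List Int} (h : c ∈ l) :
    ∀ b : Int, l.foldl min b = min b (l.foldl min c) := by
  induction l with
  | nil => cases h
  | cons a t ih =>
      intro b
      rcases List.mem_cons.mp h with rfl | hc
      · simp only [List.foldl_cons, min_self]
        rw [pvFoldlMin_init_comm t b c, ← pvFoldlMin_init_comm t c b, min_comm c b,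
          pvFoldlMin_init_comm t b c]
      · simp only [List.foldl_cons]
        rw [pvFoldlMin_init_comm t b a, ih hc b, pvFoldlMin_init_comm t c a]
        have h1 := pvFoldlMin_le_init t b
        have h2 := pvFoldlMin_le_init t c
        omega

theorem pvFoldlMin_le_mem {c : Int} {l : List Int} (h : c ∈ l) (b : Int) :
    l.foldl min b ≤ c := by
  rw [pvFoldlMin_present h b]
  have := pvFoldlMin_le_init l c
  omega

theorem pvFoldlMin_all_ge {l : List Int} {b : Int} (h : ∀ x ∈ l, b ≤ x) :
    l.foldl min b = b := by
  induction l with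
  | nil => rfl
  | cons a t ih =>
      have ha : b ≤ a := h a (by simp)
      have hm : min b a = b := by omega
      simp only [List.foldl_cons, hm]
      exact ih (fun x hx => h x (by simp [hx]))

theorem pvFoldlMin_mem_min {c : Int} {l : List Int} (hc : c ∈ l)
    (hall : ∀ x ∈ l, c ≤ x) (b : Int) : l.foldl min b = min b c := by
  rw [pvFoldlMin_present hc b, pvFoldlMin_all_ge hall]

theorem pvFoldlMin_lt {l : List Int} {c : Int} (h : ∀ x ∈ l, c < x) :
    ∀ b : Int, c < b → c < l.foldl min b := by
  induction l with
  | nil => intro b hb; simpa using hb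
  | cons a t ih =>
      intro b hb
      have ha : c < a := h a (by simp)
      simp only [List.foldl_cons]
      exact ih (fun x hx => h x (by simp [hx])) (min b a) (by omega)

theorem pvFoldlMin_perm {l l' : List Int} (h : l.Perm l') :
    ∀ b : Int, l.foldl min b = l'.foldl min b := by
  induction h with
  | nil => intro b; rfl
  | cons a _ ih => intro b; simp only [List.foldl_cons]; exact ih (min b a)
  | swap a a' t =>
      intro b
      have h : min (min b a') a = min (min b a) a' := by omega
      simp only [List.foldl_cons, h]
  | trans _ _ ih1 ih2 => intro b; rw [ih1 b, ih2 b]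

theorem pvFoldlMinAbs_rev (c : Int) (L : List Int) (r : Int) :
    L.reverse.foldl (fun a y => min a |c + y|) r = L.foldl (fun a y => min a |c + y|) r := by
  have h : ∀ (M : List Int) (r : Int), M.foldl (fun a y => min a |c + y|) r
      = (M.map (fun y => |c + y|)).foldl min r := by
    intro M
    induction M with
    | nil => intro r; rfl
    | cons a t ih => intro r; simp only [List.map_cons, List.foldl_cons]; exact ih _
  rw [h, h, List.map_reverse]
  exact pvFoldlMin_perm (List.reverse_perm _) r

theorem pvFlatMap_single (g : Int → Int) (L : List Int) :
    L.flatMap (fun u => [g u]) = L.map g := by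
  induction L with
  | nil => rfl
  | cons a t ih => simp only [List.flatMap_cons, List.map_cons, List.singleton_append, ih]

theorem pvFoldlMin_flatMap (g : Int → List Int) (L : List Int) :
    ∀ b : Int, (L.flatMap g).foldl min b
      = L.foldl (fun acc x => (g x).foldl min acc) b := by
  induction L with
  | nil => intro b; rfl
  | cons a t ih =>
      intro b
      simp only [List.flatMap_cons, List.foldl_append, List.foldl_cons]
      exact ih _

theorem pvFlatMap_snoc_perm (f : Int → List Int) (g : Int → Int) (L : List Int) :
    (L.flatMap (fun x => f x ++ [g x])).Perm (L.flatMap f ++ L.map g) := by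
  induction L with
  | nil => rfl
  | cons a t ih =>
      simp only [List.flatMap_cons, List.map_cons]
      refine (ih.append_left (f a ++ [g a])).trans ?_
      have h2 : (f a ++ [g a]) ++ (t.flatMap f ++ t.map g)
          = f a ++ (g a :: (t.flatMap f ++ t.map g)) := by simp
      have h3 : f a ++ t.flatMap f ++ (g a :: t.map g)
          = f a ++ (t.flatMap f ++ (g a :: t.map g)) := by rw [List.append_assoc]
      rw [h2, h3]
      exact List.Perm.append_left _ (List.perm_middle.symm)

-- ---- indexing / sortedness helpers ----
theorem pvGetD_eq {l : List Int} {n : Nat} (h : n < l.length) (d : Int) :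
    l.getD n d = l[n] := by
  simp [List.getD_eq_getElem?_getD, List.getElem?_eq_getElem h]

theorem pvGetD_append_left {l1 l2 : List Int} {k : Nat} (h : k < l1.length) :
    (l1 ++ l2).getD k 0 = l1[k] := by
  rw [pvGetD_eq (by simp; omega) 0, List.getElem_append_left h]

theorem pvGetD_append_right {l1 l2 : List Int} {k : Nat} (h : k < l2.length) :
    (l1 ++ l2).getD (l1.length + k) 0 = l2[k] := by
  rw [pvGetD_eq (by simp; omega) 0,
    List.getElem_append_right (by omega)]
  simp

theorem pvTake_succ {l : List Int} {n : Nat} (h : n < l.length) :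
    l.take (n+1) = l.take n ++ [l[n]] := by
  rw [List.take_add_one, List.getElem?_eq_getElem h]
  rfl

theorem pvSortedSplit {l : List Int} (h : l.Pairwise (· ≤ ·)) :
    l = l.filter (fun x => decide (x < 0)) ++ l.filter (fun x => decide (0 ≤ x)) := by
  induction l with
  | nil => rfl
  | cons a t ih =>
      rcases List.pairwise_cons.mp h with ⟨ha, ht⟩
      by_cases hn : a < 0
      · simp only [List.filter_cons, hn, decide_true, if_true]
        have h0 : ¬ ((0:Int) ≤ a) := by omega
        simp only [h0, decide_false, Bool.false_eq_true, if_false]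
        simpa using ih ht
      · have h0 : (0:Int) ≤ a := by omega
        have hall : ∀ x ∈ t, (0:Int) ≤ x := fun x hx => le_trans h0 (ha x hx)
        have h1 : t.filter (fun x => decide (x < 0)) = [] := by
          rw [List.filter_eq_nil_iff]
          intro x hx
          have := hall x hx
          simp
          omega
        have h2 : t.filter (fun x => decide (0 ≤ x)) = t := by
          rw [List.filter_eq_self]
          intro x hx
          simpa using hall x hx
        simp [hn, h0, h1, h2]

theorem pvSorted_getElem_mono {l : List Int} (h : l.Pairwise (· ≤ ·)) {a b : Nat}
    (hab : a ≤ b) (hb : b < l.length) : l[a]'(by omega) ≤ l[b] := by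
  rcases Nat.lt_or_eq_of_le hab with hlt | heq
  · exact (List.pairwise_iff_getElem.mp h) a b (by omega) hb hlt
  · subst heq; exact le_refl _

-- `aInner` returns immediately on a negative element
theorem pvInner_stop (s : List Int) (x res : Int) (r : Nat)
    (h : s.getD r 0 < 0) : aInner s x res r = res := by
  cases r with
  | zero => simp only [aInner]; rw [if_neg (by omega)]
  | succ r => simp only [aInner]; rw [if_neg (by omega)]

theorem pvInner_step (s : List Int) (x res : Int) (r : Nat) (hr : 0 < r)
    (h : 0 ≤ s.getD r 0) :
    aInner s x res r
      = aInner s x (if |x + s.getD r 0| < res then |x + s.getD r 0| else res) (r-1) := by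
  obtain ⟨m, rfl⟩ : ∃ m, r = m+1 := ⟨r-1, by omega⟩
  simp only [aInner, if_pos h, Nat.add_sub_cancel]

-- the inner loop, started at index negs.length + k, folds the update over
-- pos[k], pos[k-1], …, pos[0]
theorem pvInner_eq (negs pos : List Int) (x : Int)
    (hneg : ∀ v ∈ negs, v < 0) (hpos : ∀ v ∈ pos, 0 ≤ v) (hne : negs ≠ []) :
    ∀ (k : Nat), k < pos.length → ∀ res : Int,
      aInner (negs ++ pos) x res (negs.length + k)
        = ((pos.take (k+1)).reverse).foldl
            (fun a y => if |x + y| < a then |x + y| else a) res := by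
  have hnn : 0 < negs.length := List.length_pos_of_ne_nil hne
  intro k
  induction k with
  | zero =>
      intro hk res
      have h1 : (negs ++ pos).getD (negs.length + 0) 0 = pos[0] := pvGetD_append_right hk
      rw [pvInner_step _ _ _ _ (by omega) (by rw [h1]; exact hpos _ (List.getElem_mem hk))]
      rw [h1]
      have h2 : negs.length + 0 - 1 = negs.length - 1 := by omega
      rw [h2, pvInner_stop]
      · have ht : pos.take (0+1) = pos.take 0 ++ [pos[0]] := pvTake_succ hk
        simp [ht]
      · have h3 : (negs ++ pos).getD (negs.length - 1) 0 = negs[negs.length - 1] :=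
          pvGetD_append_left (by omega)
        rw [h3]
        exact hneg _ (List.getElem_mem (by omega))
  | succ k ih =>
      intro hk res
      have h1 : (negs ++ pos).getD (negs.length + (k+1)) 0 = pos[k+1] :=
        pvGetD_append_right hk
      rw [pvInner_step _ _ _ _ (by omega)
        (by rw [h1]; exact hpos _ (List.getElem_mem hk))]
      rw [h1]
      have h2 : negs.length + (k+1) - 1 = negs.length + k := by omega
      rw [h2, ih (by omega)]
      have ht : pos.take (k+1+1) = pos.take (k+1) ++ [pos[k+1]] := pvTake_succ hk
      rw [ht, List.reverse_append]
      rfl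

-- the outer loop folds the inner update over the remaining negatives
theorem pvOuter_eq (negs pos : List Int)
    (hneg : ∀ v ∈ negs, v < 0) (hpos : ∀ v ∈ pos, 0 ≤ v)
    (hne : negs ≠ []) (hpe : pos ≠ []) :
    ∀ (fuel left : Nat) (res : Int), left ≤ negs.length → negs.length - left < fuel →
      aOuter (negs ++ pos) left res fuel
        = (negs.drop left).foldl
            (fun acc u => pos.foldl (fun a y => min a |u + y|) acc) res := by
  have hpl : 0 < pos.length := List.length_pos_of_ne_nil hpe
  intro fuel
  induction fuel with
  | zero => intro left res h1 h2; omega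
  | succ f ih =>
      intro left res h1 h2
      simp only [aOuter]
      by_cases hl : left < negs.length
      · have hidx : (negs ++ pos).getD left 0 = negs[left] := pvGetD_append_left hl
        rw [hidx, if_pos (hneg _ (List.getElem_mem hl))]
        have hlen : (negs ++ pos).length - 1 = negs.length + (pos.length - 1) := by
          rw [List.length_append]; omega
        rw [hlen, pvInner_eq negs pos _ hneg hpos hne (pos.length - 1) (by omega) res]
        have htk : pos.take (pos.length - 1 + 1) = pos := by
          rw [Nat.sub_add_cancel hpl, List.take_length]
        rw [htk, ih (left+1) _ (by omega) (by omega), List.drop_eq_getElem_cons hl,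
          List.foldl_cons]
        congr 1
        have hfun : (fun (a y : Int) => if |negs[left] + y| < a then |negs[left] + y| else a)
            = (fun (a y : Int) => min a |negs[left] + y|) := by
          funext a y
          exact pvIfMin a |negs[left] + y|
        rw [hfun]
        exact pvFoldlMinAbs_rev negs[left] pos res
      · have hleft : left = negs.length := by omega
        subst hleft
        have hidx : (negs ++ pos).getD (negs.length) 0 = pos[0] := by
          have := pvGetD_append_right (l1 := negs) (l2 := pos) (k := 0) hpl
          simpa using this
        rw [hidx, if_neg (by have := hpos _ (List.getElem_mem hpl); omega)]
        simp [List.drop_length]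

-- the two-pointer loop computes the min over the remaining rectangle
theorem pvBLoop_eq (negs pos : List Int)
    (hns : negs.Pairwise (· ≤ ·)) (hps : pos.Pairwise (· ≤ ·)) :
    ∀ (fuel i j : Nat) (best : Int), i < negs.length → j < pos.length →
      (negs.length - 1 - i) + j < fuel →
      bLoop negs pos i j best fuel
        = ((negs.drop i).flatMap
            (fun u => (pos.take (j+1)).map (fun y => |u + y|))).foldl min best := by
  intro fuel
  induction fuel with
  | zero => intro i j best hi hj hf; omega
  | succ f ih =>
      intro i j best hi hj hf
      simp only [bLoop]
      rw [pvGetD_eq hi 0, pvGetD_eq hj 0]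
      have hdropc : negs.drop i = negs[i] :: negs.drop (i+1) := List.drop_eq_getElem_cons hi
      have htake : pos.take (j+1) = pos.take j ++ [pos[j]] := pvTake_succ hj
      have hpj_mem : pos[j] ∈ pos.take (j+1) := by
        rw [htake]
        exact List.mem_append_right _ (by simp)
      have hni_mem : negs[i] ∈ negs.drop i := by
        rw [hdropc]
        exact List.mem_cons_self
      have hub : ∀ u ∈ negs.drop i, negs[i] ≤ u := by
        intro u hu
        rw [hdropc] at hu
        rcases List.mem_cons.mp hu with rfl | hu'
        · exact le_refl _
        · have hpw : (negs.drop i).Pairwise (· ≤ ·) := hns.drop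
          rw [hdropc] at hpw
          exact (List.pairwise_cons.mp hpw).1 u hu'
      have hyb : ∀ y ∈ pos.take (j+1), y ≤ pos[j] := by
        intro y hy
        obtain ⟨b, hb, hby⟩ := List.getElem_of_mem hy
        have hblt : b < j + 1 := by
          have h := hb
          rw [List.length_take] at h
          omega
        have hbp : b < pos.length := by omega
        have hgt : (pos.take (j+1))[b]'hb = pos[b]'hbp := List.getElem_take
        rw [hgt] at hby
        rw [← hby]
        exact pvSorted_getElem_mono hps (by omega : b ≤ j) hj
      have habs_mem_row : |negs[i] + pos[j]| ∈
          (pos.take (j+1)).map (fun y => |negs[i] + y|) :=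
        List.mem_map.mpr ⟨pos[j], hpj_mem, rfl⟩
      by_cases hv : 0 < negs[i] + pos[j]
      · rw [if_pos hv]
        -- every entry of the pointer-j column is ≥ |v|
        have hcol : ∀ e ∈ (negs.drop i).map (fun u => |u + pos[j]|),
            |negs[i] + pos[j]| ≤ e := by
          intro e he
          obtain ⟨u, hu, rfl⟩ := List.mem_map.mp he
          have h1 := hub u hu
          have h2 : negs[i] + pos[j] ≤ u + pos[j] := by omega
          have h3 := le_abs_self (u + pos[j])
          rw [abs_of_pos hv]
          omega
        cases j with
        | zero =>
            rw [if_pos rfl]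
            -- rectangle = single column
            have hcoleq : (negs.drop i).flatMap
                (fun u => (pos.take (0+1)).map (fun y => |u + y|))
                = (negs.drop i).map (fun u => |u + pos[0]|) := by
              rw [htake]
              exact pvFlatMap_single _ _
            rw [hcoleq,
              pvFoldlMin_mem_min (List.mem_map.mpr ⟨negs[i], hni_mem, rfl⟩) hcol best,
              pvIfMin]
        | succ j' =>
            rw [if_neg (Nat.succ_ne_zero j'), Nat.add_sub_cancel]
            rw [ih i j' _ hi (by omega) (by omega)]
            have hsp : ((negs.drop i).flatMap
                (fun u => (pos.take (j'+1+1)).map (fun y => |u + y|))).Perm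
                (((negs.drop i).flatMap
                  (fun u => (pos.take (j'+1)).map (fun y => |u + y|)))
                  ++ (negs.drop i).map (fun u => |u + pos[j'+1]|)) := by
              have : ∀ u : Int, (pos.take (j'+1+1)).map (fun y => |u + y|)
                  = (pos.take (j'+1)).map (fun y => |u + y|) ++ [|u + pos[j'+1]|] := by
                intro u
                rw [htake, List.map_append]
                rfl
              have heq : ((negs.drop i).flatMap
                    (fun u => (pos.take (j'+1+1)).map (fun y => |u + y|)))
                  = (negs.drop i).flatMap
                    (fun u => (pos.take (j'+1)).map (fun y => |u + y|)
                      ++ [|u + pos[j'+1]|]) := by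
                congr 1
                funext u
                exact this u
              rw [heq]
              exact pvFlatMap_snoc_perm _ _ _
            rw [pvFoldlMin_perm hsp best, List.foldl_append,
              pvFoldlMin_mem_min (List.mem_map.mpr ⟨negs[i], hni_mem, rfl⟩) hcol,
              pvIfMin, pvFoldlMin_init_comm]
            exact min_comm _ _
      · rw [if_neg hv]
        have hvle : negs[i] + pos[j] ≤ 0 := by omega
        -- every entry of the pointer-i row is ≥ |v|
        have hrow : ∀ e ∈ (pos.take (j+1)).map (fun y => |negs[i] + y|),
            |negs[i] + pos[j]| ≤ e := by
          intro e he
          obtain ⟨y, hy, rfl⟩ := List.mem_map.mp he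
          have h1 := hyb y hy
          have h2 : negs[i] + y ≤ negs[i] + pos[j] := by omega
          have h3 := neg_le_abs (negs[i] + y)
          rw [abs_of_nonpos hvle]
          omega
        by_cases hstop : negs.length - 1 ≤ i
        · rw [if_pos hstop]
          have hieq : i = negs.length - 1 := by omega
          have hdrop2 : negs.drop (i+1) = [] := List.drop_eq_nil_of_le (by omega)
          rw [hdropc, hdrop2]
          simp only [List.flatMap_cons, List.flatMap_nil, List.append_nil]
          rw [pvFoldlMin_mem_min habs_mem_row hrow best, pvIfMin]
        · rw [if_neg hstop]
          rw [ih (i+1) j _ (by omega) hj (by omega)]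
          rw [hdropc]
          simp only [List.flatMap_cons]
          rw [List.foldl_append, pvFoldlMin_mem_min habs_mem_row hrow best, pvIfMin]

-- the mixed-sign case: A's value is min(2e9, ·) of B's value, and B's value is a
-- fold of min over all cross pairs started at one of them
theorem pvMixed (A : List Int) (h2 : 2 ≤ A.length)
    (hb1 : ¬ 0 ≤ (PySem.List.sorted A (fun x => x) false).getD 0 0)
    (hb2 : ¬ (PySem.List.sorted A (fun x => x) false).getD
      ((PySem.List.sorted A (fun x => x) false).length - 1) 0 ≤ 0) :
    ∃ init : Int,
      init ∈ ((PySem.List.sorted A (fun x => x) false).filter (fun x => decide (x < 0))).flatMap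
        (fun u => ((PySem.List.sorted A (fun x => x) false).filter (fun x => decide (0 ≤ x))).map
          (fun y => |u + y|)) ∧
      solution_alt A
        = (((PySem.List.sorted A (fun x => x) false).filter (fun x => decide (x < 0))).flatMap
            (fun u => ((PySem.List.sorted A (fun x => x) false).filter (fun x => decide (0 ≤ x))).map
              (fun y => |u + y|))).foldl min init ∧
      solution A = min 2000000000 (solution_alt A) := by
  have hs : (PySem.List.sorted A (fun x => x) false).Pairwise (· ≤ ·) := by
    have := PySem.List.sorted_pairwise (xs := A) (key := fun x => x)
    simpa using this
  have hlen : (PySem.List.sorted A (fun x => x) false).length = A.length :=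
    PySem.List.length_sorted A (fun x => x) false
  set s := PySem.List.sorted A (fun x => x) false with hsdef
  set negs := s.filter (fun x => decide (x < 0)) with hnegs
  set pos := s.filter (fun x => decide (0 ≤ x)) with hpos
  have hsplit : s = negs ++ pos := pvSortedSplit hs
  have hneg : ∀ v ∈ negs, v < 0 := by
    intro v hv
    have := (List.mem_filter.mp hv).2
    simpa using this
  have hposm : ∀ v ∈ pos, 0 ≤ v := by
    intro v hv
    have := (List.mem_filter.mp hv).2
    simpa using this
  have hs0 : s.getD 0 0 = s[0]'(by omega) := pvGetD_eq (by omega) 0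
  have hsl : s.getD (s.length - 1) 0 = s[s.length - 1]'(by omega) := pvGetD_eq (by omega) 0
  have hne : negs ≠ [] := by
    intro hnil
    have hmem : s[0]'(by omega) ∈ negs := by
      rw [hnegs, List.mem_filter]
      exact ⟨List.getElem_mem _, by simp; rw [← hs0]; omega⟩
    rw [hnil] at hmem
    cases hmem
  have hpe : pos ≠ [] := by
    intro hnil
    have hmem : s[s.length - 1]'(by omega) ∈ pos := by
      rw [hpos, List.mem_filter]
      exact ⟨List.getElem_mem _, by simp; rw [← hsl]; omega⟩
    rw [hnil] at hmem
    cases hmem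
  have hnn : 0 < negs.length := List.length_pos_of_ne_nil hne
  have hpl : 0 < pos.length := List.length_pos_of_ne_nil hpe
  have hlens : negs.length + pos.length = s.length := by
    conv_rhs => rw [hsplit]
    rw [List.length_append]
  have hns : negs.Pairwise (· ≤ ·) := hs.filter _
  have hps : pos.Pairwise (· ≤ ·) := hs.filter _
  -- the initial best of B is a cross pair
  refine ⟨|negs[0]'hnn + pos[pos.length - 1]'(by omega)|, ?_, ?_, ?_⟩
  · exact List.mem_flatMap.mpr ⟨negs[0]'hnn, List.getElem_mem hnn,
      List.mem_map.mpr ⟨pos[pos.length - 1]'(by omega), List.getElem_mem (by omega), rfl⟩⟩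
  · -- B's value
    show (if 0 ≤ s.getD 0 0 then s.getD 0 0 + s.getD 1 0
      else if s.getD (s.length - 1) 0 ≤ 0 then -(s.getD (s.length - 1) 0 + s.getD (s.length - 2) 0)
      else bLoop negs pos 0 (pos.length - 1) (abs (negs.getD 0 0 + pos.getD (pos.length - 1) 0))
        (negs.length + pos.length)) = _
    rw [if_neg hb1, if_neg hb2,
      pvBLoop_eq negs pos hns hps _ 0 (pos.length - 1) _ hnn (by omega) (by omega)]
    rw [pvGetD_eq hnn 0, pvGetD_eq (show pos.length - 1 < pos.length by omega) 0]
    rw [List.drop_zero, Nat.sub_add_cancel hpl, List.take_length]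
  · -- A's value = min 2e9 B
    show (if 0 ≤ s.getD 0 0 then s.getD 0 0 + s.getD 1 0
      else if s.getD (s.length - 1) 0 ≤ 0 then |s.getD (s.length - 1) 0 + s.getD (s.length - 2) 0|
      else aOuter s 0 2000000000 s.length) = _
    rw [if_neg hb1, if_neg hb2]
    have hA : aOuter s 0 2000000000 s.length
        = (negs.flatMap (fun u => pos.map (fun y => |u + y|))).foldl min 2000000000 := by
      conv_lhs => rw [hsplit]
      rw [pvOuter_eq negs pos hneg hposm hne hpe ((negs ++ pos).length) 0 2000000000
        (by omega) (by rw [List.length_append]; omega)]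
      rw [pvFoldlMin_flatMap, List.drop_zero]
      congr 1
      funext acc u
      rw [List.foldl_map]
    rw [hA]
    -- B's value: same fold started at a member of the cross list
    have hB : solution_alt A
        = (negs.flatMap (fun u => pos.map (fun y => |u + y|))).foldl min
          (|negs[0]'hnn + pos[pos.length - 1]'(by omega)|) := by
      show (if 0 ≤ s.getD 0 0 then s.getD 0 0 + s.getD 1 0
        else if s.getD (s.length - 1) 0 ≤ 0 then -(s.getD (s.length - 1) 0 + s.getD (s.length - 2) 0)
        else bLoop negs pos 0 (pos.length - 1) (|negs.getD 0 0 + pos.getD (pos.length - 1) 0|)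
          (negs.length + pos.length)) = _
      rw [if_neg hb1, if_neg hb2,
        pvBLoop_eq negs pos hns hps _ 0 (pos.length - 1) _ hnn (by omega) (by omega)]
      rw [pvGetD_eq hnn 0, pvGetD_eq (show pos.length - 1 < pos.length by omega) 0]
      rw [List.drop_zero, Nat.sub_add_cancel hpl, List.take_length]
    rw [hB]
    exact pvFoldlMin_present (List.mem_flatMap.mpr ⟨negs[0]'hnn, List.getElem_mem hnn,
      List.mem_map.mpr ⟨pos[pos.length - 1]'(by omega), List.getElem_mem (by omega), rfl⟩⟩)
      2000000000

-- head of a sorted list is minimal, last element is maximal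
theorem pvHead_min {l : List Int} (h : l.Pairwise (· ≤ ·)) (hl : 0 < l.length) :
    ∀ x ∈ l, l[0]'hl ≤ x := by
  intro x hx
  obtain ⟨b, hb, rfl⟩ := List.getElem_of_mem hx
  exact pvSorted_getElem_mono h (by omega) hb

theorem pvLast_max {l : List Int} (h : l.Pairwise (· ≤ ·)) (hl : 0 < l.length) :
    ∀ x ∈ l, x ≤ l[l.length - 1]'(by omega) := by
  intro x hx
  obtain ⟨b, hb, rfl⟩ := List.getElem_of_mem hx
  exact pvSorted_getElem_mono h (by omega) (by omega)

theorem pvSortedOfA (A : List Int) :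
    (PySem.List.sorted A (fun x => x) false).Pairwise (· ≤ ·) := by
  have := PySem.List.sorted_pairwise (xs := A) (key := fun x => x)
  simpa using this

-- ===== VERDICT (by name: the statement is the Claim_ definition above) =====
theorem solution_spec : Claim_unchanged_solution := by
  intro A _hdom hpre hnd
  show solution A = solution_alt A
  have h2 : 2 ≤ A.length := hpre
  have hs := pvSortedOfA A
  have hlen : (PySem.List.sorted A (fun x => x) false).length = A.length :=
    PySem.List.length_sorted A (fun x => x) false
  set s := PySem.List.sorted A (fun x => x) false with hsdef
  by_cases hb1 : 0 ≤ s.getD 0 0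
  · simp only [solution, solution_alt, ← hsdef, if_pos hb1]
  · by_cases hb2 : s.getD (s.length - 1) 0 ≤ 0
    · simp only [solution, solution_alt, ← hsdef, if_neg hb1, if_pos hb2]
      have hm : s.getD (s.length - 2) 0 ≤ s.getD (s.length - 1) 0 := by
        rw [pvGetD_eq (show s.length - 2 < s.length by omega) 0,
          pvGetD_eq (show s.length - 1 < s.length by omega) 0]
        exact pvSorted_getElem_mono hs (by omega) (by omega)
      exact abs_of_nonpos (by omega)
    · obtain ⟨init, hinit, hB, hA⟩ := pvMixed A h2 hb1 hb2
      rw [hA]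
      -- from ¬D_solution, some cross pair is ≤ 2000000000
      have hc1 : ∃ x ∈ A, x < 0 := by
        refine ⟨s[0]'(by omega), ?_, ?_⟩
        · exact (PySem.List.mem_sorted A (fun x => x) false _).mp (List.getElem_mem _)
        · rw [pvGetD_eq (show 0 < s.length by omega) 0] at hb1; omega
      have hc2 : ∃ y ∈ A, 0 < y := by
        refine ⟨s[s.length - 1]'(by omega), ?_, ?_⟩
        · exact (PySem.List.mem_sorted A (fun x => x) false _).mp (List.getElem_mem _)
        · rw [pvGetD_eq (show s.length - 1 < s.length by omega) 0] at hb2; omega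
      have hc3 : ¬ ∀ x ∈ A, x < 0 → ∀ y ∈ A, 0 ≤ y → 2000000000 < |x + y| :=
        fun c3 => hnd ⟨hc1, hc2, c3⟩
      push Not at hc3
      obtain ⟨x, hxA, hxneg, y, hyA, hy0, hle⟩ := hc3
      have hxs : x ∈ s := (PySem.List.mem_sorted A (fun z => z) false x).mpr hxA
      have hys : y ∈ s := (PySem.List.mem_sorted A (fun z => z) false y).mpr hyA
      have hmem : |x + y| ∈ (s.filter (fun z => decide (z < 0))).flatMap
          (fun u => (s.filter (fun z => decide (0 ≤ z))).map (fun w => |u + w|)) := by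
        refine List.mem_flatMap.mpr ⟨x, List.mem_filter.mpr ⟨hxs, decide_eq_true hxneg⟩,
          List.mem_map.mpr ⟨y, List.mem_filter.mpr ⟨hys, decide_eq_true hy0⟩, rfl⟩⟩
      have halt : solution_alt A ≤ |x + y| := by
        rw [hB]
        exact pvFoldlMin_le_mem hmem init
      exact min_eq_right (le_trans halt hle)

theorem solution_changed : Claim_changed_solution := by
  unfold Claim_changed_solution
  decide

theorem solution_tight : Claim_exact_solution := by
  intro A _hdom hpre hD
  obtain ⟨⟨x, hxA, hxneg⟩, ⟨y, hyA, hypos⟩, h3⟩ := hD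
  have h2 : 2 ≤ A.length := hpre
  have hs := pvSortedOfA A
  have hlen : (PySem.List.sorted A (fun x => x) false).length = A.length :=
    PySem.List.length_sorted A (fun x => x) false
  set s := PySem.List.sorted A (fun x => x) false with hsdef
  have hxs : x ∈ s := (PySem.List.mem_sorted A (fun z => z) false x).mpr hxA
  have hys : y ∈ s := (PySem.List.mem_sorted A (fun z => z) false y).mpr hyA
  have hb1 : ¬ 0 ≤ s.getD 0 0 := by
    have h0 := pvHead_min hs (by omega) x hxs
    rw [pvGetD_eq (show 0 < s.length by omega) 0]
    omega
  have hb2 : ¬ s.getD (s.length - 1) 0 ≤ 0 := by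
    have hl := pvLast_max hs (by omega) y hys
    rw [pvGetD_eq (show s.length - 1 < s.length by omega) 0]
    omega
  obtain ⟨init, hinit, hB, hA⟩ := pvMixed A h2 hb1 hb2
  have hall : ∀ e ∈ (s.filter (fun z => decide (z < 0))).flatMap
      (fun u => (s.filter (fun z => decide (0 ≤ z))).map (fun w => |u + w|)),
      2000000000 < e := by
    intro e he
    obtain ⟨u, hu, he2⟩ := List.mem_flatMap.mp he
    obtain ⟨z, hz, rfl⟩ := List.mem_map.mp he2
    have hu0 : u < 0 := by have := (List.mem_filter.mp hu).2; simpa using this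
    have hz0 : (0:Int) ≤ z := by have := (List.mem_filter.mp hz).2; simpa using this
    exact h3 u ((PySem.List.mem_sorted A (fun w => w) false u).mp (List.mem_filter.mp hu).1) hu0
      z ((PySem.List.mem_sorted A (fun w => w) false z).mp (List.mem_filter.mp hz).1) hz0
  have hgt : 2000000000 < solution_alt A := by
    rw [hB]
    exact pvFoldlMin_lt hall init (hall init hinit)
  rw [hA, min_eq_left (le_of_lt hgt)]
  exact ne_of_lt hgt
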